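-- pv_equiv track=rewrite | github.com/hienpham15/Codeforces_competitions | Codeforces_round724/C.py | func
-- ===== SOURCE A (Python) =====
-- def all_D(prefix):
--     count = 0
--     for char in prefix:
--         if char == 'D':
--             count += 1
--
--     if count == len(prefix):
--         return True
--     else:
--         return False
--
-- def all_K(prefix):
--     count = 0
--     for char in prefix:
--         if char == 'D':
--             count += 1
--
--     if count == len(prefix):
--         return True
--     else:
--         return False
--
-- def find_DK(prefix):
--     n_DK = prefix.count('DK')
--     return n_DK
--
-- def find_KD(prefix):
--     n_KD = prefix.count('KD')
--     return n_KD
--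
-- def func(string, n):
--     s = []
--     prefix = ''
--     for i in range(n):
--         prefix += string[i]
--
--         if all_D(prefix):
--             s.append(len(prefix))
--         elif all_K(prefix):
--             s.append(prefix)
--         else:
--             n_DK = find_DK(prefix)
--             n_KD = find_KD(prefix)
--
--             if n_DK >= n_KD:
--                 s.append(n_DK)
--             else:
--                 s.append(n_KD)
--     return s
-- ===== SOURCE B (Python) =====
-- def func(string, n):
--     s = []
--     all_d = True
--     dk = kd = 0
--     prev = None
--     for i in range(n):
--         c = string[i]
--         if prev == 'D' and c == 'K':
--             dk += 1
--         elif prev == 'K' and c == 'D':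
--             kd += 1
--         all_d = all_d and c == 'D'
--         s.append(i + 1 if all_d else max(dk, kd))
--         prev = c
--     return s
-- ===== Notes on version B (the rewrite author's own statement) =====
-- stated objective: faster
-- what changed: B replaces A's per-prefix rescans (recounting 'D's and re-running str.count('DK')/str.count('KD') on every prefix) with a single left-to-right pass that maintains a running all-D flag and incremental DK/KD pair counters via the previous character.
import Mathlib
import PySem

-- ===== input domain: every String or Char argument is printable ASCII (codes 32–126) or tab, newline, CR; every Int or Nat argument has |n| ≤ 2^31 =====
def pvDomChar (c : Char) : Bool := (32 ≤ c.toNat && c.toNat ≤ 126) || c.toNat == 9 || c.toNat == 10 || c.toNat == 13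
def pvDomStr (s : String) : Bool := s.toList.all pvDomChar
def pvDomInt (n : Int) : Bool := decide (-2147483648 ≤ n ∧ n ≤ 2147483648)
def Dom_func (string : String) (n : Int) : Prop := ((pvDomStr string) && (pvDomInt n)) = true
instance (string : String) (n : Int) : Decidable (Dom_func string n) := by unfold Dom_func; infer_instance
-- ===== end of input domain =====

-- B replaces A's per-prefix rescans (all_D count + str.count of 'DK'/'KD') by one pass with
-- incremental counters: asymptotically faster (O(n) vs O(n^2)).

-- ===== PORT A =====
-- all_D: count the 'D's by a loop, compare to the length
def pvAllD (pfx : List Char) : Bool :=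
  let count := pfx.foldl (fun count char => if char = 'D' then count + 1 else count) (0 : Int)
  if count = (pfx.length : Int) then true else false

-- all_K: textually identical to all_D in the source (copy-paste: it also counts 'D')
def pvAllK (pfx : List Char) : Bool :=
  let count := pfx.foldl (fun count char => if char = 'D' then count + 1 else count) (0 : Int)
  if count = (pfx.length : Int) then true else false

def pvFindDK (pfx : List Char) : Int := (PySem.Chars.count pfx ['D', 'K'] : Int)

def pvFindKD (pfx : List Char) : Int := (PySem.Chars.count pfx ['K', 'D'] : Int)

def func (string : String) (n : Int) : List Int :=
  (((PySem.List.pyRange 0 n 1).foldl (fun st i =>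
    match PySem.Str.pyGet? string i with
    | none => st            -- IndexError in Python; excluded by Pre_func
    | some c =>
      let pfx := st.2 ++ [c]
      let s := st.1
      if pvAllD pfx then (s ++ [(pfx.length : Int)], pfx)
      else if pvAllK pfx then
        -- unreachable: pvAllK ≡ pvAllD, so this test is false whenever it is reached;
        -- the Python would append the str `prefix` here, a value outside List Int
        (s ++ [0], pfx)
      else
        let nDK := pvFindDK pfx
        let nKD := pvFindKD pfx
        if nDK ≥ nKD then (s ++ [nDK], pfx) else (s ++ [nKD], pfx))
    (([] : List Int), ([] : List Char)))).1

-- ===== PORT B =====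
def func_alt (string : String) (n : Int) : List Int :=
  (((PySem.List.pyRange 0 n 1).foldl (fun st i =>
    match st with
    | (s, allD, dk, kd, prev) =>
      match PySem.Str.pyGet? string i with
      | none => st          -- IndexError in Python; excluded by Pre_func
      | some c =>
        let dkkd : Int × Int :=
          if prev = some 'D' ∧ c = 'K' then (dk + 1, kd)
          else if prev = some 'K' ∧ c = 'D' then (dk, kd + 1)
          else (dk, kd)
        let allD' := allD && (c = 'D')
        (s ++ [if allD' then i + 1 else max dkkd.1 dkkd.2], allD', dkkd.1, dkkd.2, some c))
    (([] : List Int), true, (0 : Int), (0 : Int), (none : Option Char)))).1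

-- ===== PRECONDITION & SPEC =====
-- Pre_func: the loop reads string[i] for i < n, so A raises IndexError when n exceeds the length.
def Pre_func (string : String) (n : Int) : Prop := n ≤ (string.toList.length : Int)
instance (string : String) (n : Int) : Decidable (Pre_func string n) := by unfold Pre_func; infer_instance

def pvWitness_func : String × Int := ("DKDDKX", 6)

def Spec_func (string : String) (n : Int) (out : List Int) : Prop := out = func_alt string n
instance (string : String) (n : Int) (out : List Int) : Decidable (Spec_func string n out) := by unfold Spec_func; infer_instance

-- ===== CLAIM (what is proved, stated in full; the proofs are below) =====
def Claim_equal_func : Prop := ∀ (string : String) (n : Int), Dom_func string n → Pre_func string n → Spec_func string n (func string n)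

-- ===== LEMMAS AND PROOFS =====

-- number of adjacent (a, b) pairs in a character list
def pairCnt (a b : Char) : List Char → Nat
  | x :: y :: t => (if x = a ∧ y = b then 1 else 0) + pairCnt a b (y :: t)
  | _ => 0

-- the value both programs append for a (nonempty) prefix p
def prefVal (p : List Char) : Int :=
  if p.all (· = 'D') then (p.length : Int)
  else max ((pairCnt 'D' 'K' p : Int)) ((pairCnt 'K' 'D' p : Int))

lemma pairCnt_cons (a b x : Char) (t : List Char) :
    pairCnt a b (x :: t) = (if x = a ∧ t.head? = some b then 1 else 0) + pairCnt a b t := by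
  cases t with
  | nil => simp [pairCnt]
  | cons y t' => simp [pairCnt]

lemma pairCnt_cons_ne (a b x : Char) (t : List Char) (hx : x ≠ a) :
    pairCnt a b (x :: t) = pairCnt a b t := by
  rw [pairCnt_cons]; simp [hx]

lemma pairCnt_append_singleton (a b c : Char) (l : List Char) :
    pairCnt a b (l ++ [c]) =
      pairCnt a b l + (if l.getLast? = some a ∧ c = b then 1 else 0) := by
  induction l with
  | nil => simp [pairCnt]
  | cons x t ih =>
    rw [List.cons_append, pairCnt_cons, ih, pairCnt_cons]
    cases t with
    | nil => simp [pairCnt]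
    | cons y t' => simp; omega

lemma countGo_eq_pairCnt (a b : Char) (hab : a ≠ b) :
    ∀ (fuel : Nat) (l : List Char) (acc : Nat), l.length ≤ fuel →
      PySem.Chars.count.go [a, b] fuel l acc = acc + pairCnt a b l := by
  intro fuel
  induction fuel with
  | zero =>
    intro l acc hl
    interval_cases hlen : l.length
    rw [List.length_eq_zero_iff] at hlen
    subst hlen
    simp [PySem.Chars.count.go, pairCnt]
  | succ fuel ih =>
    intro l acc hl
    cases l with
    | nil => simp [PySem.Chars.count.go, pairCnt]
    | cons x t =>
      show (if [a,b].isPrefixOf (x :: t) then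
              PySem.Chars.count.go [a,b] fuel (List.drop ([a,b].length) (x :: t)) (acc + 1)
            else PySem.Chars.count.go [a,b] fuel t acc) = acc + pairCnt a b (x :: t)
      by_cases hpre : [a, b].IsPrefix (x :: t)
      · obtain ⟨t', ht'⟩ := hpre
        have hx : a = x := by simpa using congrArg List.head? ht'
        have ht : t = b :: t' := by
          have := congrArg List.tail ht'
          simpa using this.symm
        subst hx; subst ht
        have hpre' : [a, b].isPrefixOf (a :: b :: t') = true := by
          simp
        rw [if_pos hpre']
        simp only [List.length_cons, List.length_nil, List.drop_succ_cons, List.drop_zero,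
          Nat.zero_add]
        rw [ih t' (acc + 1) (by simp at hl; omega)]
        have : pairCnt a b (a :: b :: t') = 1 + pairCnt a b t' := by
          rw [pairCnt_cons, pairCnt_cons_ne a b b t' (Ne.symm hab)]
          simp
        omega
      · rw [if_neg (by simpa [List.isPrefixOf_iff_prefix] using hpre)]
        rw [ih t acc (by simp at hl; omega)]
        rw [pairCnt_cons]
        have : ¬ (x = a ∧ t.head? = some b) := by
          rintro ⟨h1, h2⟩
          cases t with
          | nil => simp at h2
          | cons y tt =>
            simp only [List.head?_cons, Option.some.injEq] at h2
            exact hpre (by subst h1; subst h2; exact ⟨tt, rfl⟩)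
        rw [if_neg this]
        omega

lemma count_eq_pairCnt (a b : Char) (hab : a ≠ b) (l : List Char) :
    PySem.Chars.count l [a, b] = pairCnt a b l := by
  show (if ([a, b] : List Char).isEmpty then l.length + 1
        else PySem.Chars.count.go [a, b] l.length l 0) = pairCnt a b l
  rw [if_neg (by simp)]
  simpa using countGo_eq_pairCnt a b hab l.length l 0 le_rfl

lemma pvAllD_eq (p : List Char) : pvAllD p = p.all (· = 'D') := by
  unfold pvAllD
  rw [show (fun (count : Int) (char : Char) => if char = 'D' then count + 1 else count)
        = (fun (count : Int) (char : Char) => if char == 'D' then count + 1 else count) by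
      funext c ch; simp]
  rw [PySem.List.foldl_beq_add_one]
  simp only [zero_add]
  have hiff : ((p.count 'D' : Int) = (p.length : Int)) ↔ (p.all (· = 'D') = true) := by
    rw [List.all_eq_true]
    constructor
    · intro h x hx
      have hc : p.count 'D' = p.length := by exact_mod_cast h
      simpa using ((List.count_eq_length.mp hc) x hx).symm
    · intro h
      have hall : ∀ b ∈ p, 'D' = b := fun b hb => (by simpa using h b hb : b = 'D').symm
      exact_mod_cast List.count_eq_length.mpr hall
  by_cases hall : p.all (· = 'D') = true
  · rw [hall, if_pos (hiff.mpr hall)]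
  · rw [Bool.not_eq_true] at hall
    rw [hall, if_neg (fun hc => by rw [hiff.mp hc] at hall; exact absurd hall (by decide))]

-- one step of A's loop appends prefVal of the grown prefix
lemma stepA_val (p : List Char) (s : List Int) (c : Char) :
    (if pvAllD (p ++ [c]) then (s ++ [((p ++ [c]).length : Int)], p ++ [c])
     else if pvAllK (p ++ [c]) then (s ++ [0], p ++ [c])
     else
       let nDK := pvFindDK (p ++ [c])
       let nKD := pvFindKD (p ++ [c])
       if nDK ≥ nKD then (s ++ [nDK], p ++ [c]) else (s ++ [nKD], p ++ [c]))
    = (s ++ [prefVal (p ++ [c])], p ++ [c]) := by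
  have hKD : pvAllK = pvAllD := rfl
  by_cases h : pvAllD (p ++ [c]) = true
  · rw [if_pos h]
    unfold prefVal
    rw [pvAllD_eq] at h
    rw [if_pos h]
  · rw [if_neg h, hKD, if_neg h]
    show (if pvFindDK (p ++ [c]) ≥ pvFindKD (p ++ [c]) then (s ++ [pvFindDK (p ++ [c])], p ++ [c])
          else (s ++ [pvFindKD (p ++ [c])], p ++ [c])) = (s ++ [prefVal (p ++ [c])], p ++ [c])
    unfold prefVal pvFindDK pvFindKD
    rw [pvAllD_eq] at h
    rw [if_neg h, count_eq_pairCnt 'D' 'K' (by decide), count_eq_pairCnt 'K' 'D' (by decide)]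
    split_ifs with hge
    · simp only [Prod.mk.injEq, and_true, List.append_cancel_left_eq, List.cons.injEq]
      omega
    · simp only [Prod.mk.injEq, and_true, List.append_cancel_left_eq, List.cons.injEq]
      omega

-- the state of A's fold after k iterations
lemma foldA_state (string : String) (k : Nat) (hk : k ≤ string.toList.length) :
    (PySem.List.pyRange 0 (k : Int) 1).foldl (fun st i =>
      match PySem.Str.pyGet? string i with
      | none => st
      | some c =>
        let pfx := st.2 ++ [c]
        let s := st.1
        if pvAllD pfx then (s ++ [(pfx.length : Int)], pfx)
        else if pvAllK pfx then (s ++ [0], pfx)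
        else
          let nDK := pvFindDK pfx
          let nKD := pvFindKD pfx
          if nDK ≥ nKD then (s ++ [nDK], pfx) else (s ++ [nKD], pfx))
      (([] : List Int), ([] : List Char))
    = ((List.range k).map (fun j => prefVal (string.toList.take (j + 1))), string.toList.take k) := by
  induction k with
  | zero =>
    have h0 : ((0 : Nat) : Int) = 0 := by norm_num
    rw [h0, PySem.List.pyRange_one_eq_nil (le_refl 0)]
    simp
  | succ k ih =>
    have hk' : k ≤ string.toList.length := Nat.le_of_succ_le hk
    have hsplit : PySem.List.pyRange 0 ((k + 1 : Nat) : Int) 1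
        = PySem.List.pyRange 0 (k : Int) 1 ++ [(k : Int)] := by
      have := PySem.List.pyRange_one_succ_right (a := 0) (b := (k : Int)) (by positivity)
      push_cast
      push_cast at this
      exact this
    rw [hsplit, List.foldl_append, ih hk']
    have hget : PySem.Str.pyGet? string ((k : Nat) : Int) = some (string.toList[k]'hk) := by
      rw [PySem.Str.pyGet?_natCast]
      exact List.getElem?_eq_getElem hk
    simp only [List.foldl_cons, List.foldl_nil, hget]
    have htake : string.toList.take k ++ [string.toList[k]'hk] = string.toList.take (k + 1) := by
      rw [List.take_add_one, List.getElem?_eq_getElem hk]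
      rfl
    rw [stepA_val]
    rw [htake, List.range_succ, List.map_append]
    simp

-- one step of B's counter update matches pairCnt on the grown prefix
lemma pairCnt_step (p : List Char) (c : Char) :
    ((if p.getLast? = some 'D' ∧ c = 'K' then ((pairCnt 'D' 'K' p : Int) + 1, (pairCnt 'K' 'D' p : Int))
      else if p.getLast? = some 'K' ∧ c = 'D' then ((pairCnt 'D' 'K' p : Int), (pairCnt 'K' 'D' p : Int) + 1)
      else ((pairCnt 'D' 'K' p : Int), (pairCnt 'K' 'D' p : Int))) : Int × Int)
    = ((pairCnt 'D' 'K' (p ++ [c]) : Int), (pairCnt 'K' 'D' (p ++ [c]) : Int)) := by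
  rw [pairCnt_append_singleton, pairCnt_append_singleton]
  split_ifs with h1 h2 <;> simp_all

lemma all_append_singleton (p : List Char) (c : Char) :
    (p ++ [c]).all (· = 'D') = (p.all (· = 'D') && (c = 'D')) := by
  simp

-- the state of B's fold after k iterations
lemma foldB_state (string : String) (k : Nat) (hk : k ≤ string.toList.length) :
    (PySem.List.pyRange 0 (k : Int) 1).foldl (fun st i =>
      match st with
      | (s, allD, dk, kd, prev) =>
        match PySem.Str.pyGet? string i with
        | none => st
        | some c =>
          let dkkd : Int × Int :=
            if prev = some 'D' ∧ c = 'K' then (dk + 1, kd)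
            else if prev = some 'K' ∧ c = 'D' then (dk, kd + 1)
            else (dk, kd)
          let allD' := allD && (c = 'D')
          (s ++ [if allD' then i + 1 else max dkkd.1 dkkd.2], allD', dkkd.1, dkkd.2, some c))
      (([] : List Int), true, (0 : Int), (0 : Int), (none : Option Char))
    = ((List.range k).map (fun j => prefVal (string.toList.take (j + 1))),
       (string.toList.take k).all (· = 'D'),
       (pairCnt 'D' 'K' (string.toList.take k) : Int),
       (pairCnt 'K' 'D' (string.toList.take k) : Int),
       (string.toList.take k).getLast?) := by
  induction k with
  | zero =>
    have h0 : ((0 : Nat) : Int) = 0 := by norm_num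
    rw [h0, PySem.List.pyRange_one_eq_nil (le_refl 0)]
    simp [pairCnt]
  | succ k ih =>
    have hk' : k ≤ string.toList.length := Nat.le_of_succ_le hk
    have hsplit : PySem.List.pyRange 0 ((k + 1 : Nat) : Int) 1
        = PySem.List.pyRange 0 (k : Int) 1 ++ [(k : Int)] := by
      have := PySem.List.pyRange_one_succ_right (a := 0) (b := (k : Int)) (by positivity)
      push_cast
      push_cast at this
      exact this
    rw [hsplit, List.foldl_append, ih hk']
    have hget : PySem.Str.pyGet? string ((k : Nat) : Int) = some (string.toList[k]'hk) := by
      rw [PySem.Str.pyGet?_natCast]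
      exact List.getElem?_eq_getElem hk
    simp only [List.foldl_cons, List.foldl_nil, hget]
    have htake : string.toList.take k ++ [string.toList[k]'hk] = string.toList.take (k + 1) := by
      rw [List.take_add_one, List.getElem?_eq_getElem hk]
      rfl
    set c := string.toList[k]'hk with hc
    set p := string.toList.take k with hp
    have hcnt := pairCnt_step p c
    have hpair : (if p.getLast? = some 'D' ∧ c = 'K'
          then ((pairCnt 'D' 'K' p : Int) + 1, (pairCnt 'K' 'D' p : Int))
          else if p.getLast? = some 'K' ∧ c = 'D'
          then ((pairCnt 'D' 'K' p : Int), (pairCnt 'K' 'D' p : Int) + 1)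
          else ((pairCnt 'D' 'K' p : Int), (pairCnt 'K' 'D' p : Int)))
        = ((pairCnt 'D' 'K' (p ++ [c]) : Int), (pairCnt 'K' 'D' (p ++ [c]) : Int)) := hcnt
    simp only [hpair, htake]
    have hlast : (string.toList.take (k + 1)).getLast? = some c := by
      rw [← htake]; simp
    rw [hlast]
    have hval : (if ((p.all (· = 'D')) && (c = 'D')) = true
          then ((k : Int) + 1)
          else max (pairCnt 'D' 'K' (string.toList.take (k + 1)) : Int)
                   (pairCnt 'K' 'D' (string.toList.take (k + 1)) : Int))
        = prefVal (string.toList.take (k + 1)) := by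
      unfold prefVal
      rw [← htake, all_append_singleton p c]
      by_cases hall : ((p.all (· = 'D')) && (c = 'D')) = true
      · rw [if_pos hall, if_pos hall]
        have hlen : (p ++ [c]).length = k + 1 := by
          rw [htake, List.length_take]; omega
        rw [hlen]
        push_cast; ring
      · rw [if_neg hall, if_neg hall, htake]
    rw [hval]
    have hallp : ((p.all fun x => decide (x = 'D')) && decide (c = 'D'))
        = (string.toList.take (k + 1)).all (fun x => decide (x = 'D')) := by
      rw [← htake]; simp
    rw [hallp]
    rw [List.range_succ, List.map_append]
    simp

-- ===== VERDICT (by name: the statement is the Claim_ definition above) =====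
theorem func_spec : Claim_equal_func := by
  intro string n _ hpre
  unfold Spec_func func func_alt
  by_cases hn : n ≤ 0
  · rw [PySem.List.pyRange_one_eq_nil hn]
    simp [List.foldl_nil]
  · rw [not_le] at hn
    have hkn : n = ((n.toNat : Nat) : Int) := by omega
    have hk : n.toNat ≤ string.toList.length := by
      unfold Pre_func at hpre; omega
    rw [hkn, foldA_state string n.toNat hk, foldB_state string n.toNat hk]
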